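-- pv_equiv track=rewrite | github.com/miliar/Code_Jam_Webscraper | Solutions_in_python/Problem_179/SmallD.py | generate_divisor
-- ===== SOURCE A (Python) =====
-- def generate_divisor(num):
--
-- 	is_prime = True
--
-- 	for q in range(2, 500):
-- 		if num % q == 0:
-- 			example = q
-- 			is_prime = False
--
-- 	if is_prime:
-- 		return 0
-- 	else:
-- 		return example
-- ===== SOURCE B (Python) =====
-- def generate_divisor(num):
--     for q in range(499, 1, -1):
--         if num % q == 0:
--             return q
--     return 0
-- ===== Notes on version B (the rewrite author's own statement) =====
-- stated objective: alternative
-- what changed: B scans the candidate range downward and returns the first divisor found (early exit), instead of A's full forward scan that remembers the last divisor in a flag/variable pair.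
import Mathlib
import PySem

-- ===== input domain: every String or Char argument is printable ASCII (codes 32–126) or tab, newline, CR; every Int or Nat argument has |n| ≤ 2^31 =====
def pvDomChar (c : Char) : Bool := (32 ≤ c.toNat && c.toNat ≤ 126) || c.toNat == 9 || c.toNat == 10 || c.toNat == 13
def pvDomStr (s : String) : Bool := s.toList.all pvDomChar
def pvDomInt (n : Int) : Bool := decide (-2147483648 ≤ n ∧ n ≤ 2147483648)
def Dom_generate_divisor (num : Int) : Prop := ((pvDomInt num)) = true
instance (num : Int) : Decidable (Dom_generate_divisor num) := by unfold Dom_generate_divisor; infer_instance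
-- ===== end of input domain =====

-- B scans q downward from 499 and returns the first divisor it meets (the largest), instead of
-- A's full forward scan of 2..499 remembering the last divisor; early exit instead of a flag pair.

-- ===== PORT A =====
-- forward scan over range(2,500): state (is_prime, example); example initialised 0, only read when a divisor was seen
def generate_divisor (num : Int) : Int :=
  let s := (PySem.List.pyRange 2 500 1).foldl
    (fun (st : Bool × Int) q => if PySem.Int.mod num q = 0 then (false, q) else st)
    (true, 0)
  if s.1 then 0 else s.2

-- ===== PORT B =====
-- descending loop of Source B: range(499, 1, -1) with early return, as structural recursion on q
def genDivDown (num : Int) : Nat → Int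
  | 0 => 0
  | 1 => 0
  | (q+2) => if PySem.Int.mod num ((q : Int)+2) = 0 then (q : Int)+2 else genDivDown num (q+1)

def generate_divisor_alt (num : Int) : Int := genDivDown num 499

-- ===== PRECONDITION & SPEC =====
def Spec_generate_divisor (num : Int) (out : Int) : Prop := out = generate_divisor_alt num
instance (num : Int) (out : Int) : Decidable (Spec_generate_divisor num out) := by unfold Spec_generate_divisor; infer_instance

-- ===== CLAIM (what is proved, stated in full; the proofs are below) =====
def Claim_equal_generate_divisor : Prop := ∀ (num : Int), Dom_generate_divisor num → Spec_generate_divisor num (generate_divisor num)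

-- ===== LEMMAS AND PROOFS =====

-- the forward fold over 2..(2+n) yields the same answer as the descending scan starting at n+1
theorem genDiv_key (num : Int) (n : Nat) :
    (let s := (PySem.List.pyRange 2 ((2:Int)+n) 1).foldl
        (fun (st : Bool × Int) q => if PySem.Int.mod num q = 0 then (false, q) else st)
        (true, 0)
      if s.1 then 0 else s.2) = genDivDown num (n+1) := by
  induction n with
  | zero =>
      simp [PySem.List.pyRange_one_eq_nil, genDivDown]
  | succ n ih =>
      have h : (2:Int) ≤ 2 + n := by omega
      have hrw : ((2:Int) + (↑(n+1))) = ((2:Int) + n) + 1 := by push_cast; ring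
      rw [hrw, PySem.List.pyRange_one_succ_right h, List.foldl_append]
      simp only [List.foldl]
      by_cases hd : PySem.Int.mod num ((2:Int)+n) = 0
      · simp [hd, genDivDown, show ((n:Int)+2) = 2+n by ring]
      · simp only [hd]
        have : ¬ PySem.Int.mod num ((n:Int)+2) = 0 := by
          rwa [show ((n:Int)+2) = 2+n by ring]
        simp only [genDivDown, this]
        exact ih

-- ===== VERDICT (by name: the statement is the Claim_ definition above) =====
theorem generate_divisor_spec : Claim_equal_generate_divisor := by
  intro num _
  unfold Spec_generate_divisor generate_divisor generate_divisor_alt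
  have h := genDiv_key num 498
  norm_num at h
  exact h
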